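-- pv_equiv track=rewrite | github.com/dvirsegev/AI-H.W | decision_tree.py | same_class_equal
-- ===== SOURCE A (Python) =====
-- def same_class_equal(train_data):
--     """
--
--     :param train_data: our train data
--     :return: true if everyone is the same class, false otherwise.
--     """
--     first_time_yes = False
--     first_time_no = False
--     for data in train_data:
--         if data[-1] == "yes":
--             first_time_yes = True
--         if data[-1] == "no":
--             first_time_no = True
--         if first_time_no and first_time_yes:
--             return False
--     return True
-- ===== SOURCE B (Python) =====
-- def same_class_equal(train_data):
--     # No pair of rows may disagree with one labelled "yes" and the other "no".
--     return all(not (x[-1] == "yes" and y[-1] == "no")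
--                for x in train_data for y in train_data)
-- ===== Notes on version B (the rewrite author's own statement) =====
-- stated objective: alternative
-- what changed: Replaces A's single flag-carrying early-exit scan by a pairwise check over the Cartesian product of rows: the data is uniform unless some pair of rows has one row labelled 'yes' and the other 'no'.
-- outside the precondition, e.g. on same_class_equal([[]]): A raises IndexError, B raises IndexError
import Mathlib
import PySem

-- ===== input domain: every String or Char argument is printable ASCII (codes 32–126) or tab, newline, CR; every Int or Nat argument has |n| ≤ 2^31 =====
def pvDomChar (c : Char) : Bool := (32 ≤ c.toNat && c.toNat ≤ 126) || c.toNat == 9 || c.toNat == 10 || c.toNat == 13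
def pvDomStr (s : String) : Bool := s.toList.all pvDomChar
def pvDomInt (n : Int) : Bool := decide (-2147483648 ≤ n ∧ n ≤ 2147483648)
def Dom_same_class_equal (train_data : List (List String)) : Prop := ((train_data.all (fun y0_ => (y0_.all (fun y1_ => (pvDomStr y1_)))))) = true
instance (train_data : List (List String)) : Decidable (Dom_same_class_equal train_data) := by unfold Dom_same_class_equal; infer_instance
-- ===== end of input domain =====

-- ===== PORT A =====
-- B checks every ordered pair of rows for a "yes"/"no" disagreement instead of A's
-- flag-carrying early-exit scan; return value only, rows must be nonempty (Pre_).
def goA_same_class_equal (fy fn : Bool) : List (List String) → Bool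
  | [] => true
  | d :: rest =>
    let fy' := if PySem.List.pyGet? d (-1) == some "yes" then true else fy
    let fn' := if PySem.List.pyGet? d (-1) == some "no" then true else fn
    if fn' && fy' then false else goA_same_class_equal fy' fn' rest

def same_class_equal (train_data : List (List String)) : Bool :=
  goA_same_class_equal false false train_data

-- ===== PORT B =====
-- all(not (x[-1]=="yes" and y[-1]=="no") for x in train_data for y in train_data);
-- row[-1] is pyGet? (none = IndexError, excluded by Pre_)
def same_class_equal_alt (train_data : List (List String)) : Bool :=
  train_data.all (fun x => train_data.all (fun y =>
    !(PySem.List.pyGet? x (-1) == some "yes" && PySem.List.pyGet? y (-1) == some "no")))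

-- ===== PRECONDITION & SPEC =====
-- Pre_ excludes inputs containing an empty row, on which both A and B raise IndexError at row[-1].
def Pre_same_class_equal (train_data : List (List String)) : Prop :=
  (train_data.all (fun r => !r.isEmpty)) = true
instance (train_data : List (List String)) : Decidable (Pre_same_class_equal train_data) := by
  unfold Pre_same_class_equal; infer_instance
def pvWitness_same_class_equal : List (List String) := [["a", "yes"], ["b", "yes"]]
def Spec_same_class_equal (train_data : List (List String)) (out : Bool) : Prop := out = same_class_equal_alt train_data
instance (train_data : List (List String)) (out : Bool) : Decidable (Spec_same_class_equal train_data out) := by unfold Spec_same_class_equal; infer_instance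

-- ===== CLAIM (what is proved, stated in full; the proofs are below) =====
def Claim_equal_same_class_equal : Prop := ∀ (train_data : List (List String)), Dom_same_class_equal train_data → Pre_same_class_equal train_data → Spec_same_class_equal train_data (same_class_equal train_data)

-- ===== LEMMAS AND PROOFS =====
def pvHas (y : String) (l : List (List String)) : Bool :=
  l.any (fun d => PySem.List.pyGet? d (-1) == some y)

theorem goA_eq (l : List (List String)) : ∀ (fy fn : Bool), ¬ (fy = true ∧ fn = true) →
    goA_same_class_equal fy fn l = !((fy || pvHas "yes" l) && (fn || pvHas "no" l)) := by
  induction l with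
  | nil =>
    intro fy fn h
    simp [goA_same_class_equal, pvHas]
    cases fy <;> cases fn <;> simp_all
  | cons d rest ih =>
    intro fy fn h
    simp only [goA_same_class_equal]
    by_cases hy : PySem.List.pyGet? d (-1) == some "yes" <;>
    by_cases hn : PySem.List.pyGet? d (-1) == some "no" <;>
      simp only [hy, hn, if_true] <;>
      cases fy <;> cases fn <;>
      first
      | (simp_all [pvHas, beq_iff_eq]; done)
            | (rw [ih _ _ (by simp_all)]; simp_all [pvHas]; done)
      | (have hy' : (PySem.List.pyGet? d (-1) == some "yes") = false := by
           simp_all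
         have hn' : (PySem.List.pyGet? d (-1) == some "no") = false := by
           simp_all
         simp [ih false false (by simp), pvHas, hy', hn'])

theorem alt_eq (td : List (List String)) :
    same_class_equal_alt td = !(pvHas "yes" td && pvHas "no" td) := by
  unfold same_class_equal_alt pvHas
  rw [Bool.eq_iff_iff]
  simp only [List.all_eq_true, Bool.not_eq_true', Bool.not_and, Bool.or_eq_true,
    List.any_eq_false]
  constructor
  · intro h
    by_cases hx : ∀ x ∈ td, (PySem.List.pyGet? x (-1) == some "yes") = false
    · exact Or.inl (fun x hxm => by simp [hx x hxm])
    · push Not at hx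
      obtain ⟨x, hxm, px⟩ := hx
      refine Or.inr (fun y hy => ?_)
      rcases h x hxm y hy with h1 | h1
      · exact absurd h1 px
      · exact (by simp [h1])
  · rintro (h | h) x hx y hy
    · exact Or.inl (by simpa using h x hx)
    · exact Or.inr (by simpa using h y hy)

-- ===== VERDICT (by name: the statement is the Claim_ definition above) =====
theorem same_class_equal_spec : Claim_equal_same_class_equal := by
  intro td _ _
  unfold Spec_same_class_equal same_class_equal
  rw [goA_eq td false false (by simp), alt_eq]
  simp
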